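-- pv_equiv track=rewrite | github.com/zeqiii/Bench4I | gen.py | _gen_path
-- ===== SOURCE A (Python) =====
-- def _gen_path(conditions):
--     if len(conditions.keys()) <= 1:
--         result_paths = []
--         _keys = list(conditions.keys())
--         k = _keys[0]
--         for one in conditions[k]:
--             result_paths.append([one])
--         return result_paths
--     else:
--         _keys = list(conditions.keys())
--         k = _keys[0]
--         cond_ids = conditions.pop(k)
--         paths = _gen_path(conditions)
--         result_paths = []
--         for one in cond_ids:
--             new_paths = []
--             for path in paths:
--                 new_path = []
--                 for node in path:
--                     new_path.append(node)
--                 new_paths.append(new_path)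
--             for path in new_paths:
--                 path.append(one)
--                 result_paths.append(path)
--         return result_paths
-- ===== SOURCE B (Python) =====
-- def _gen_path(conditions):
--     # Iterative fold instead of recursion; same return value, same IndexError
--     # on an empty dict, and the same mutation (all keys but the last are popped).
--     keys = list(conditions.keys())
--     result = [[v] for v in conditions[keys[-1]]]
--     for k in keys[-2::-1]:
--         vals = conditions.pop(k)
--         result = [path + [v] for v in vals for path in result]
--     return result
-- ===== Notes on version B (the rewrite author's own statement) =====
-- stated objective: simpler
-- what changed: Replaces the recursive divide-and-pop with a single iterative fold over the keys in reverse, building the product with one comprehension per key.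
-- outside the precondition, e.g. on _gen_path({}): A raises IndexError, B raises IndexError
import Mathlib
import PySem

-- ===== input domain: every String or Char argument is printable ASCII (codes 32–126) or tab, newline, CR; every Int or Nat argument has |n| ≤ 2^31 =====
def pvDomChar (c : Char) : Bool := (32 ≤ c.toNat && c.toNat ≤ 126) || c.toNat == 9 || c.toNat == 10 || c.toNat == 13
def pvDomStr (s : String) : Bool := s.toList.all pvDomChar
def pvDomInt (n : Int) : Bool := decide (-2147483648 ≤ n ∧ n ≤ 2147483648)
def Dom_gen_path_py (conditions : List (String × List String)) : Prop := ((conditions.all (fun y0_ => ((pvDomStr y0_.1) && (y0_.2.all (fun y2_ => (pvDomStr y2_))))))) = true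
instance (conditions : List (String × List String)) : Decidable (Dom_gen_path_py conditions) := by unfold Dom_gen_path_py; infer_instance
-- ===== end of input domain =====

-- B replaces A's recursion by one iterative fold over the keys in reverse (objective: simpler).
-- Both Pythons mutate `conditions` identically (all keys but the last are popped);
-- the equivalence proved here is about the RETURN value.

-- ===== PORT A =====
-- Literal transliteration of A's recursion.  `conditions` is the dict as an association
-- list; under Pre_ the keys are distinct, so `conditions.pop(k)` with k the first key
-- reads the head pair's value and leaves the tail, and `len(conditions) <= 1` on a
-- nonempty cons cell means the tail is empty.
def gen_path_py (conditions : List (String × List String)) : List (List String) :=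
  match conditions with
  | [] => []        -- Python raises IndexError at `_keys[0]`; excluded by Pre_
  | (_, vs) :: rest =>
    if rest = [] then
      -- base case: for one in conditions[k]: result_paths.append([one])
      vs.foldl (fun result_paths one => result_paths ++ [[one]]) []
    else
      -- cond_ids = conditions.pop(k); paths = _gen_path(conditions)
      let paths := gen_path_py rest
      vs.foldl (fun result_paths one =>
        -- new_paths: element-by-element copy of each path
        let new_paths := paths.foldl (fun np path =>
          np ++ [path.foldl (fun q node => q ++ [node]) []]) []
        -- for path in new_paths: path.append(one); result_paths.append(path)
        new_paths.foldl (fun rp path => rp ++ [path ++ [one]]) result_paths) []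

-- ===== PORT B =====
-- Literal transliteration of Source B: seed with the last key's values, then fold the
-- remaining keys back-to-front.  `conditions.pop(k)` is the key's value (keys are
-- distinct under Pre_), i.e. the pair's own second component here.
def gen_path_py_alt (conditions : List (String × List String)) : List (List String) :=
  match conditions.getLast? with
  | none => []      -- Python raises IndexError at `keys[-1]`; excluded by Pre_
  | some (_, lastVals) =>
    let init := lastVals.map (fun v => [v])
    (conditions.dropLast.reverse).foldl
      (fun result kv =>
        kv.2.flatMap (fun v => result.map (fun path => path ++ [v]))) init

-- ===== PRECONDITION & SPEC =====
-- Pre_ excludes the empty dict (A raises IndexError at `_keys[0]`) and requires the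
-- keys to be distinct (a Python dict cannot hold duplicate keys, so duplicate-key
-- association lists do not represent any input A receives).
def Pre_gen_path_py (conditions : List (String × List String)) : Prop :=
  conditions ≠ [] ∧ (conditions.map Prod.fst).Nodup
instance (conditions : List (String × List String)) : Decidable (Pre_gen_path_py conditions) := by unfold Pre_gen_path_py; infer_instance

def pvWitness_gen_path_py : (List (String × List String)) :=
  [("a", ["1", "2"]), ("b", ["x"])]

def Spec_gen_path_py (conditions : List (String × List String)) (out : List (List String)) : Prop := out = gen_path_py_alt conditions
instance (conditions : List (String × List String)) (out : List (List String)) : Decidable (Spec_gen_path_py conditions out) := by unfold Spec_gen_path_py; infer_instance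

-- ===== CLAIM (what is proved, stated in full; the proofs are below) =====
def Claim_equal_gen_path_py : Prop := ∀ (conditions : List (String × List String)), Dom_gen_path_py conditions → Pre_gen_path_py conditions → Spec_gen_path_py conditions (gen_path_py conditions)

-- ===== LEMMAS AND PROOFS =====

-- the copy loop is the identity
theorem pv_copy (path l : List String) :
    path.foldl (fun q node => q ++ [node]) l = l ++ path :=
  PySem.List.foldl_append_singleton_eq_self path l

theorem pv_copy_all (paths : List (List String)) (l : List (List String)) :
    paths.foldl (fun np path => np ++ [path.foldl (fun q node => q ++ [node]) []]) l
      = l ++ paths := by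
  induction paths generalizing l with
  | nil => simp
  | cons p ps ih =>
    rw [List.foldl_cons, pv_copy, ih]
    simp

theorem pv_append_one (one : String) (ps l : List (List String)) :
    ps.foldl (fun rp path => rp ++ [path ++ [one]]) l = l ++ ps.map (· ++ [one]) :=
  PySem.List.foldl_append_singleton_eq_map (f := (· ++ [one])) ps l

-- A's outer loop as a flatMap
theorem pv_outer (vs : List String) (paths : List (List String)) (l : List (List String)) :
    vs.foldl (fun result_paths one =>
        let new_paths := paths.foldl (fun np path =>
          np ++ [path.foldl (fun q node => q ++ [node]) []]) []
        new_paths.foldl (fun rp path => rp ++ [path ++ [one]]) result_paths) l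
      = l ++ vs.flatMap (fun one => paths.map (· ++ [one])) := by
  induction vs generalizing l with
  | nil => simp
  | cons v vt ih =>
    rw [List.foldl_cons]
    simp only [pv_copy_all, List.nil_append, pv_append_one]
    simp [List.append_assoc, List.flatMap]

theorem pv_alt_step (x y : String × List String) (t : List (String × List String)) :
    gen_path_py_alt (x :: y :: t)
      = x.2.flatMap (fun v => (gen_path_py_alt (y :: t)).map (· ++ [v])) := by
  cases h : (y :: t).getLast? with
  | none => simp [List.getLast?_eq_none_iff] at h
  | some p =>
    obtain ⟨k2, lv⟩ := p
    simp only [gen_path_py_alt, List.getLast?_cons_cons, h, List.dropLast_cons₂,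
      List.reverse_cons, List.foldl_append, List.foldl_cons, List.foldl_nil]

theorem pv_main (conditions : List (String × List String)) (h : conditions ≠ []) :
    gen_path_py conditions = gen_path_py_alt conditions := by
  induction conditions with
  | nil => exact absurd rfl h
  | cons hd tl ih =>
    obtain ⟨k, vs⟩ := hd
    cases tl with
    | nil =>
      have hA : gen_path_py [(k, vs)]
          = vs.foldl (fun result_paths one => result_paths ++ [[one]]) [] := by
        rw [gen_path_py]; simp
      have hB : gen_path_py_alt [(k, vs)] = vs.map (fun v => [v]) := by
        rw [gen_path_py_alt]; simp
      rw [hA, hB, PySem.List.foldl_append_singleton_eq_map (f := fun one => [one])]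
      simp
    | cons hd2 tl2 =>
      have htl : hd2 :: tl2 ≠ [] := by simp
      rw [gen_path_py]
      simp only [reduceCtorEq, if_false, pv_outer, List.nil_append, ih htl]
      rw [pv_alt_step]

-- ===== VERDICT (by name: the statement is the Claim_ definition above) =====
theorem gen_path_py_spec : Claim_equal_gen_path_py := by
  intro conditions _ hpre
  exact pv_main conditions hpre.1
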